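-- pv_equiv track=rewrite | github.com/piamanns/spellchecker | src/tests/spelling_error_parser.py | _parse_errors_per_length
-- ===== SOURCE A (Python) =====
-- def _parse_errors_per_length(error_dict: dict):
--     errors_per_length = {}
--     for error in error_dict:
--         length = len(error)
--         if length not in errors_per_length:
--             errors_per_length[length] = []
--         errors_per_length[length].append(error)
--     return errors_per_length
-- ===== SOURCE B (Python) =====
-- def _parse_errors_per_length(error_dict: dict):
--     keys = list(error_dict)
--     lengths = dict.fromkeys(len(k) for k in keys)
--     return {length: [k for k in keys if len(k) == length] for length in lengths}
-- ===== Notes on version B (the rewrite author's own statement) =====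
-- stated objective: simpler
-- what changed: Instead of one pass that maintains and conditionally creates mutable buckets in a dict, B first computes the ordered distinct lengths (dict.fromkeys) and then builds the whole result as a dict comprehension, one filtering pass per length.
import Mathlib
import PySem

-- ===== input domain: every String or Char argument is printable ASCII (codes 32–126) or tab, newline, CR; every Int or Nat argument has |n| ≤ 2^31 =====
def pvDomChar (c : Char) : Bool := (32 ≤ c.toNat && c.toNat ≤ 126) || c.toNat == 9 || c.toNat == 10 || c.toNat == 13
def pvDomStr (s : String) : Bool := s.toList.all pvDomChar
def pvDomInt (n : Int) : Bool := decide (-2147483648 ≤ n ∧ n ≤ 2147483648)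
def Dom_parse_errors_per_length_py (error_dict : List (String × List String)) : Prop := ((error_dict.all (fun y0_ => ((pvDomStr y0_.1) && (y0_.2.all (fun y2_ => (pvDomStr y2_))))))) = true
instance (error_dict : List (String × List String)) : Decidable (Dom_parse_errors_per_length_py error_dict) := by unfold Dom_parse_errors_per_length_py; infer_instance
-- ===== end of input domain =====

-- B replaces A's bucket-maintaining single pass by a dedup of the lengths plus one filtering
-- pass per distinct length (objective: simpler; same return value, not faster).
-- ===== PORT A =====
def parse_errors_per_length_py (error_dict : List (String × List String)) : List (Int × List String) :=
  (error_dict.foldl (fun errors_per_length error =>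
      let length : Int := PySem.Str.len error.1
      let errors_per_length :=
        if errors_per_length.contains length then errors_per_length
        else errors_per_length.insert length []
      errors_per_length.modify length [] (fun l => l ++ [error.1]))
    PySem.Dict.empty).items

-- ===== PORT B =====
def parse_errors_per_length_py_alt (error_dict : List (String × List String)) : List (Int × List String) :=
  let keys := error_dict.map Prod.fst
  let lengths := PySem.List.dedup (keys.map PySem.Str.len)
  lengths.map (fun length => (length, keys.filter (fun k => PySem.Str.len k == length)))

-- ===== PRECONDITION & SPEC =====
def Spec_parse_errors_per_length_py (error_dict : List (String × List String)) (out : List (Int × List String)) : Prop := out = parse_errors_per_length_py_alt error_dict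
instance (error_dict : List (String × List String)) (out : List (Int × List String)) : Decidable (Spec_parse_errors_per_length_py error_dict out) := by unfold Spec_parse_errors_per_length_py; infer_instance

-- ===== CLAIM (what is proved, stated in full; the proofs are below) =====
def Claim_equal_parse_errors_per_length_py : Prop := ∀ (error_dict : List (String × List String)), Dom_parse_errors_per_length_py error_dict → Spec_parse_errors_per_length_py error_dict (parse_errors_per_length_py error_dict)

-- ===== LEMMAS AND PROOFS =====

-- ===== VERDICT (by name: the statement is the Claim_ definition above) =====
-- A's step (create-if-absent then append) is exactly Dict.modify with default [].
theorem stepA_eq_modify (d : PySem.Dict Int (List String)) (L : Int) (x : String) :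
    (if d.contains L then d else d.insert L []).modify L [] (fun l => l ++ [x])
      = d.modify L [] (fun l => l ++ [x]) := by
  by_cases h : d.contains L = true
  · simp [h]
  · simp only [Bool.not_eq_true] at h
    simp [h, PySem.Dict.modify, PySem.Dict.insert_insert_self, PySem.Dict.getD_insert_self,
      PySem.Dict.getD_of_not_contains d [] h]

theorem parse_errors_per_length_py_spec : Claim_equal_parse_errors_per_length_py := by
  intro ed _
  show parse_errors_per_length_py ed = parse_errors_per_length_py_alt ed
  have hfold : parse_errors_per_length_py ed
      = ((ed.map (fun p => ((PySem.Str.len p.1 : Int), p.1))).foldl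
          (fun d p => d.modify p.1 [] (fun l => l ++ [p.2])) PySem.Dict.empty).items := by
    rw [List.foldl_map]
    unfold parse_errors_per_length_py
    have : (fun (errors_per_length : PySem.Dict Int (List String)) (error : String × List String) =>
        let length : Int := PySem.Str.len error.1
        let errors_per_length :=
          if errors_per_length.contains length then errors_per_length
          else errors_per_length.insert length []
        errors_per_length.modify length [] (fun l => l ++ [error.1]))
      = fun (x : PySem.Dict Int (List String)) (y : String × List String) =>
          x.modify (PySem.Str.len y.1, y.1).1 [] (fun l => l ++ [(PySem.Str.len y.1, y.1).2]) := by
      funext d p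
      simpa using stepA_eq_modify d (PySem.Str.len p.1) p.1
    rw [this]
  set l' := ed.map (fun p => ((PySem.Str.len p.1 : Int), p.1)) with hl'
  set D := l'.foldl (fun d p => d.modify p.1 [] (fun l => l ++ [p.2])) PySem.Dict.empty with hD
  have hnodup : D.keys.Nodup := by
    rw [hD, show (fun (d : PySem.Dict Int (List String)) (p : Int × String) =>
        d.modify p.1 [] (fun l => l ++ [p.2]))
      = fun d p => d.modify ((fun q : Int × String => q.1) p) [] ((fun _ q (l : List String) => l ++ [q.2]) d p) from rfl]
    exact PySem.Dict.nodup_keys_foldl_modify_key l' _ [] _ _ (by simp)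
  have hkeys : D.keys = PySem.List.dedup ((ed.map Prod.fst).map PySem.Str.len) := by
    rw [hD, show (fun (d : PySem.Dict Int (List String)) (p : Int × String) =>
        d.modify p.1 [] (fun l => l ++ [p.2]))
      = fun d p => d.modify ((fun q : Int × String => q.1) p) [] ((fun _ q (l : List String) => l ++ [q.2]) d p) from rfl,
      PySem.Dict.keys_foldl_modify_key]
    simp [PySem.Set.update_nil_left, PySem.List.dedup_eq_ofList, hl', List.map_map, Function.comp_def]
  have hgetD : ∀ L : Int, D.getD L []
      = (ed.map Prod.fst).filter (fun k => PySem.Str.len k == L) := by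
    intro L
    rw [hD, PySem.Dict.getD_foldl_modify_append l' PySem.Dict.empty L]
    simp [hl', List.filter_map, List.map_map, Function.comp_def]
  rw [hfold, PySem.Dict.items_eq_map_keys D hnodup [], hkeys]
  unfold parse_errors_per_length_py_alt
  simp only []
  apply List.map_congr_left
  intro L _
  rw [hgetD L]
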